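-- pv_equiv track=rewrite | github.com/fatehaszaman/LeetCode | Other/star_box.py | generate_box
-- ===== SOURCE A (Python) =====
-- def generate_box(n):
--     if n < 2:
--         return []
--
--     box = []
--     for i in range(n):
--         if i == 0 or i == n - 1:
--             # Top and bottom rows: all stars
--             row = '*' * n
--         else:
--             # Middle rows: star + spaces + star
--             row = '*' + ' ' * (n - 2) + '*'
--         box.append([row])  # Each row as a list with one string
--     return box
-- ===== SOURCE B (Python) =====
-- def generate_box(n):
--     # Per-cell rule: cell (i, j) is a star iff it lies on the boundary of the n x n grid.
--     if n < 2:
--         return []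
--     return [[''.join('*' if i == 0 or i == n - 1 or j == 0 or j == n - 1 else ' '
--                      for j in range(n))]
--             for i in range(n)]
-- ===== Notes on version B (the rewrite author's own statement) =====
-- stated objective: alternative
-- what changed: B generates the box from a per-cell boundary predicate over a 2D index grid (a cell is a star iff it lies on the border of the n-by-n grid), instead of A's per-row construction by string repetition with a branch on the row index.
import Mathlib
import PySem

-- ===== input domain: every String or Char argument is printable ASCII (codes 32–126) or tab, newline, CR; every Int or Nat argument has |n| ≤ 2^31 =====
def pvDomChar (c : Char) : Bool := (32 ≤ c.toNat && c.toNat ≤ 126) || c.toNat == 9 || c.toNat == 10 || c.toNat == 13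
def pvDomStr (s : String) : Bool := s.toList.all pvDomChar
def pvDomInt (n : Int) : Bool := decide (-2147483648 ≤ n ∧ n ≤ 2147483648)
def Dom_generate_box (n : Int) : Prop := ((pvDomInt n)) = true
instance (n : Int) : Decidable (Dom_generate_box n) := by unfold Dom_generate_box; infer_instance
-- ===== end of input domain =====

-- B builds the box from a per-cell boundary predicate over a 2D index grid instead of
-- A's per-row string repetition with a branch on the row index (objective: alternative).

-- ===== PORT A =====
-- '*' * n  (Python string repetition; '' for n ≤ 0) — exact via pyRepeat on the char list
def pvStarsA (n : Int) : String := String.ofList (PySem.List.pyRepeat ['*'] n)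
-- '*' + ' ' * (n - 2) + '*'
def pvMidA (n : Int) : String := String.ofList ('*' :: (PySem.List.pyRepeat [' '] (n - 2) ++ ['*']))

def generate_box (n : Int) : List (List String) :=
  if n < 2 then []
  else
    (PySem.List.pyRange 0 n 1).foldl
      (fun box i =>
        box ++ [[ if i = 0 ∨ i = n - 1 then pvStarsA n else pvMidA n ]]) []

-- ===== PORT B =====
-- cell (i, j) of the n×n grid: '*' on the boundary, ' ' inside
def pvCellB (n i j : Int) : Char :=
  if i = 0 ∨ i = n - 1 ∨ j = 0 ∨ j = n - 1 then '*' else ' '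

def generate_box_alt (n : Int) : List (List String) :=
  if n < 2 then []
  else
    (PySem.List.pyRange 0 n 1).map
      (fun i => [String.ofList ((PySem.List.pyRange 0 n 1).map (pvCellB n i))])

-- ===== PRECONDITION & SPEC =====
def Spec_generate_box (n : Int) (out : List (List String)) : Prop := out = generate_box_alt n
instance (n : Int) (out : List (List String)) : Decidable (Spec_generate_box n out) := by unfold Spec_generate_box; infer_instance

-- ===== CLAIM =====
def Claim_equal_generate_box : Prop := ∀ (n : Int), Dom_generate_box n → Spec_generate_box n (generate_box n)

-- ===== LEMMAS AND PROOFS =====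

-- A boundary row of B equals A's solid row.
theorem pv_row_boundary (n i : Int) (h2 : 2 ≤ n) (hi : i = 0 ∨ i = n - 1) :
    String.ofList ((PySem.List.pyRange 0 n 1).map (pvCellB n i)) = pvStarsA n := by
  unfold pvStarsA
  congr 1
  rw [PySem.List.pyRepeat_singleton]
  have hmap : (PySem.List.pyRange 0 n 1).map (pvCellB n i)
      = (PySem.List.pyRange 0 n 1).map (fun _ => '*') := by
    apply List.map_congr_left
    intro j _
    unfold pvCellB
    rcases hi with h | h <;> simp [h]
  rw [hmap, List.map_const', PySem.List.length_pyRange_one]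
  simp

-- A middle row of B equals A's hollow row.
theorem pv_row_middle (n i : Int) (h2 : 2 ≤ n) (hi0 : i ≠ 0) (hi1 : i ≠ n - 1) :
    String.ofList ((PySem.List.pyRange 0 n 1).map (pvCellB n i)) = pvMidA n := by
  unfold pvMidA
  congr 1
  have h0n : (0 : Int) < n := by omega
  have h1n : (1 : Int) ≤ n - 1 := by omega
  rw [PySem.List.pyRange_one_cons h0n]
  simp only [zero_add]
  have hsplit : PySem.List.pyRange 1 n 1
      = PySem.List.pyRange 1 (n - 1) 1 ++ [n - 1] := by
    have := PySem.List.pyRange_one_succ_right (a := 1) (b := n - 1) h1n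
    simpa using this
  rw [hsplit]
  simp only [List.map_cons, List.map_append]
  have hmid : (PySem.List.pyRange 1 (n - 1) 1).map (pvCellB n i)
      = (PySem.List.pyRange 1 (n - 1) 1).map (fun _ => ' ') := by
    apply List.map_congr_left
    intro j hj
    rw [PySem.List.mem_pyRange_one] at hj
    unfold pvCellB
    have : ¬ (i = 0 ∨ i = n - 1 ∨ j = 0 ∨ j = n - 1) := by omega
    simp [this]
  rw [hmid, List.map_const', PySem.List.length_pyRange_one]
  have hc0 : pvCellB n i 0 = '*' := by unfold pvCellB; simp
  have hc1 : pvCellB n i (n - 1) = '*' := by unfold pvCellB; simp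
  rw [hc0, hc1, PySem.List.pyRepeat_singleton]
  have : (n - 1 - 1).toNat = (n - 2).toNat := by omega
  rw [this]
  simp

-- ===== VERDICT =====
theorem generate_box_spec : Claim_equal_generate_box := by
  intro n _
  unfold Spec_generate_box generate_box generate_box_alt
  by_cases h : n < 2
  · simp [h]
  · push_neg at h
    simp only [if_neg (not_lt.mpr h)]
    rw [PySem.List.foldl_append_singleton_eq_map]
    apply List.map_congr_left
    intro i hi
    rw [PySem.List.mem_pyRange_one] at hi
    by_cases hb : i = 0 ∨ i = n - 1
    · rw [if_pos hb, pv_row_boundary n i h hb]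
    · push_neg at hb
      rw [if_neg (by tauto), pv_row_middle n i h hb.1 hb.2]
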